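-- pv_equiv track=rewrite | github.com/UnterLort/CS415 | team_points.py | compute_team_points
-- ===== SOURCE A (Python) =====
-- def compute_team_points(rosters, player_points):
--     # Make an empty dictionary
--     team_points = {}
--
--     # Add each team to the dictionary
--     for team, players in rosters.items():
--         # Make the total points 0
--         total_points = 0
--         # Add each player in the roster of the current team
--         for player, points in player_points:
--             # Check if the player's name is in the roster of the current team
--             if player in players:
--                 # Add the points scored by that player to the total points for the current team
--                 total_points += points
--
--         # Add the team name and total points to the dictionary
--         team_points[team] = total_points
--
--     # Return team points
--     return team_points
-- ===== SOURCE B (Python) =====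
-- def compute_team_points(rosters, player_points):
--     # One pass: total points per player.
--     totals = {}
--     for player, points in player_points:
--         totals[player] = totals.get(player, 0) + points
--     # Per team: sum the totals of the distinct players on its roster.
--     team_points = {}
--     for team, players in rosters.items():
--         team_points[team] = sum(totals.get(p, 0) for p in set(players))
--     return team_points
-- ===== Notes on version B (the rewrite author's own statement) =====
-- stated objective: faster
-- what changed: Replaces the per-team scan of player_points with a list-membership test by a single pass building a per-player totals dict, then one lookup per distinct roster player per team.
import Mathlib
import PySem

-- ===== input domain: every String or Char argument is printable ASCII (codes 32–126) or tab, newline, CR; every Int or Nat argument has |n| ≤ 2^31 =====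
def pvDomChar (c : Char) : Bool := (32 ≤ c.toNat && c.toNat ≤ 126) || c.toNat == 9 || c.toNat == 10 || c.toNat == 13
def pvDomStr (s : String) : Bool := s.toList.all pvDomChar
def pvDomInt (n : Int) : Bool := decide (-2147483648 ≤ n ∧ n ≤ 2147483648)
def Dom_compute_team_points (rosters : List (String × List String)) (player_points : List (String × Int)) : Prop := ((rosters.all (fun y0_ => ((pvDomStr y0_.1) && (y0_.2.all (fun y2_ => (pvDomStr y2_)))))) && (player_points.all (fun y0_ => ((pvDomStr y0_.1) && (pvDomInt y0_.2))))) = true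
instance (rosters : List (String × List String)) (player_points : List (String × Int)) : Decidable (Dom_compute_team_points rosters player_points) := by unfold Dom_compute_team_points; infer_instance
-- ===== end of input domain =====

-- B replaces A's per-team rescan of player_points with a one-pass per-player totals dict
-- and a lookup per distinct roster player; return values proved equal (no mutation involved).

-- ===== PORT A =====
def compute_team_points (rosters : List (String × List String)) (player_points : List (String × Int)) : List (String × Int) :=
  -- team_points = {}; for team, players in rosters.items(): ... team_points[team] = total_points
  (rosters.foldl
    (fun (d : PySem.Dict String Int) tp =>
      d.insert tp.1
        -- total_points = 0; for player, points in player_points: if player in players: total_points += points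
        (player_points.foldl
          (fun tot pr => if tp.2.contains pr.1 then tot + pr.2 else tot) 0))
    PySem.Dict.empty).items

-- ===== PORT B =====
-- totals = {}; for player, points in player_points: totals[player] = totals.get(player, 0) + points
def pvTotals (player_points : List (String × Int)) : PySem.Dict String Int :=
  player_points.foldl
    (fun (d : PySem.Dict String Int) pr => d.insert pr.1 (d.getD pr.1 0 + pr.2))
    PySem.Dict.empty

def compute_team_points_alt (rosters : List (String × List String)) (player_points : List (String × Int)) : List (String × Int) :=
  let totals := pvTotals player_points
  -- for team, players in rosters.items(): team_points[team] = sum(totals.get(p, 0) for p in set(players))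
  (rosters.foldl
    (fun (d : PySem.Dict String Int) tp =>
      d.insert tp.1 (((PySem.Set.ofList tp.2).map (fun p => totals.getD p 0)).sum))
    PySem.Dict.empty).items

-- ===== PRECONDITION & SPEC =====
def Spec_compute_team_points (rosters : List (String × List String)) (player_points : List (String × Int)) (out : List (String × Int)) : Prop := out = compute_team_points_alt rosters player_points
instance (rosters : List (String × List String)) (player_points : List (String × Int)) (out : List (String × Int)) : Decidable (Spec_compute_team_points rosters player_points out) := by unfold Spec_compute_team_points; infer_instance

-- ===== CLAIM (what is proved, stated in full; the proofs are below) =====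
def Claim_equal_compute_team_points : Prop := ∀ (rosters : List (String × List String)) (player_points : List (String × Int)), Dom_compute_team_points rosters player_points → Spec_compute_team_points rosters player_points (compute_team_points rosters player_points)

-- ===== LEMMAS AND PROOFS =====

-- totals.get(q, 0) after the counting loop = sum of the points recorded for q
theorem pv_getD_totals (pp : List (String × Int)) (d : PySem.Dict String Int) (q : String) :
    (pp.foldl (fun (d : PySem.Dict String Int) pr => d.insert pr.1 (d.getD pr.1 0 + pr.2)) d).getD q 0
      = d.getD q 0 + (pp.map (fun pr => if pr.1 = q then pr.2 else 0)).sum := by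
  induction pp generalizing d with
  | nil => simp
  | cons a t ih =>
    simp only [List.foldl_cons, List.map_cons, List.sum_cons, ih, PySem.Dict.getD_insert]
    by_cases h : q = a.1
    · subst h; simp; ring
    · have hne : ¬ a.1 = q := fun hh => h hh.symm
      simp only [if_neg h, if_neg hne]; ring

-- summing 'if a = p then v else 0' over a duplicate-free list
theorem pv_sum_ite_nodup (L : List String) (hnd : L.Nodup) (a : String) (v : Int) :
    (L.map (fun p => if a = p then v else 0)).sum = if L.contains a then v else 0 := by
  induction L with
  | nil => simp
  | cons x t ih =>
    rcases List.nodup_cons.mp hnd with ⟨hx, ht⟩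
    simp only [List.map_cons, List.sum_cons, ih ht]
    by_cases h : a = x
    · subst h
      simp
      exact fun h' => absurd h' hx
    ·       simp [h]

-- the fold A runs per team is a sum of guarded points
theorem pv_foldl_guarded (players : List String) (pp : List (String × Int)) (t : Int) :
    pp.foldl (fun tot pr => if players.contains pr.1 then tot + pr.2 else tot) t
      = t + (pp.map (fun pr => if players.contains pr.1 then pr.2 else 0)).sum := by
  induction pp generalizing t with
  | nil => simp
  | cons a s ih =>
    simp only [List.foldl_cons, List.map_cons, List.sum_cons, ih]
    split_ifs with h <;> ring

-- per-team value: B's deduped lookup sum equals A's rescan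
theorem pv_team_value (players : List String) (pp : List (String × Int)) :
    ((PySem.Set.ofList players).map (fun p => (pvTotals pp).getD p 0)).sum
      = pp.foldl (fun tot pr => if players.contains pr.1 then tot + pr.2 else tot) 0 := by
  rw [pv_foldl_guarded]
  simp only [pvTotals, pv_getD_totals, PySem.Dict.getD_empty, zero_add]
  induction pp with
  | nil => simp
  | cons a s ih =>
    simp only [List.map_cons, List.sum_cons]
    have hsplit :
        ((PySem.Set.ofList players).map
            (fun p => (if a.1 = p then a.2 else 0) + (s.map (fun pr => if pr.1 = p then pr.2 else 0)).sum)).sum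
          = ((PySem.Set.ofList players).map (fun p => if a.1 = p then a.2 else 0)).sum
            + ((PySem.Set.ofList players).map (fun p => (s.map (fun pr => if pr.1 = p then pr.2 else 0)).sum)).sum :=
      PySem.List.sum_map_add_int _ _ _
    rw [hsplit, ih,
        pv_sum_ite_nodup _ (PySem.Set.nodup_ofList players) a.1 a.2]
    have hc : (List.contains (PySem.Set.ofList players) a.1) = players.contains a.1 := by
      by_cases hm : a.1 ∈ players <;> simp [hm, PySem.Set.mem_ofList]
    rw [hc]

-- ===== VERDICT (by name: the statement is the Claim_ definition above) =====
theorem compute_team_points_spec : Claim_equal_compute_team_points := by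
  intro rosters pp _
  unfold Spec_compute_team_points compute_team_points compute_team_points_alt
  have hstep :
      (fun (d : PySem.Dict String Int) (tp : String × List String) =>
          d.insert tp.1 (pp.foldl (fun tot pr => if tp.2.contains pr.1 then tot + pr.2 else tot) 0))
        = (fun (d : PySem.Dict String Int) tp =>
          d.insert tp.1 (((PySem.Set.ofList tp.2).map (fun p => (pvTotals pp).getD p 0)).sum)) := by
    funext d tp
    rw [pv_team_value]
  rw [hstep]
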